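-- pv_equiv track=rewrite | github.com/miliar/Code_Jam_Webscraper | solutions_python/solutions_year15_round0_nr1/2885.py | solve
-- ===== SOURCE A (Python) =====
-- def solve(Smax, S):
-- 	#for every i>0 the following must hold:
-- 	#SUM(from i=1 to i=i) S_{i-1} >= if S_i != 0
-- 	sum=0;
-- 	min_friends=0;
--
-- 	#according to the description always will be a person in the audience
-- 	if Smax==0:
-- 		return 0;
--
-- 	for i in range(1,Smax+1):
-- 		sum = sum + int(S[i-1])
-- 		if int(S[i]) > 0:
-- 			if sum < i:
-- 				min_friends = min_friends + i-sum
-- 				sum=i;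
--
-- 	return min_friends
-- ===== SOURCE B (Python) =====
-- def solve(Smax, S):
--     # Staged: parse once, build the prefix-sum list, then take the max deficit
--     # i - prefix[i-1] over threshold positions i with S[i] > 0.
--     if Smax <= 0:
--         return 0
--     vals = [int(s) for s in S[:Smax + 1]]
--     prefixes = []
--     total = 0
--     for v in vals[:-1]:
--         total += v
--         prefixes.append(total)
--     deficits = [i + 1 - p for i, p in enumerate(prefixes) if vals[i + 1] > 0]
--     return max([0] + deficits)
-- ===== Notes on version B (the rewrite author's own statement) =====
-- stated objective: alternative
-- what changed: A is one fold keeping a self-correcting accumulator that it resets to i and a running sum of corrections; B works in stages: it parses the strings once into a list, materialises the raw prefix-sum list (no resets), builds the list of deficits i - prefix at threshold positions by a filtered comprehension, and returns its maximum (with 0).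
import Mathlib
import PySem

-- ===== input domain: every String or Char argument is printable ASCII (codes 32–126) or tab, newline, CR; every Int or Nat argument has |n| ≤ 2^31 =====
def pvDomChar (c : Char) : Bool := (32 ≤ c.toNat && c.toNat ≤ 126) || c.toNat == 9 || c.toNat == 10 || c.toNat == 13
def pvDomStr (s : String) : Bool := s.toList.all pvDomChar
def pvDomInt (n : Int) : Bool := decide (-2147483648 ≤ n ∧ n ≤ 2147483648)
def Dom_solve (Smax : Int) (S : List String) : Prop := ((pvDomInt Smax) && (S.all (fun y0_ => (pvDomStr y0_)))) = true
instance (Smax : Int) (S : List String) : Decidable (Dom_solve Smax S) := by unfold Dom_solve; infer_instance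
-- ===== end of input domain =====

-- B replaces A's single fold with a self-correcting reset accumulator by staged passes:
-- parse once, build the raw prefix-sum list, take the max of the filtered deficit list.
-- Objective: alternative decomposition, same O(Smax) cost.

-- ===== PORT A =====
-- int(S[i]) under Pre_solve: the index is in range and the string parses, so the default is never used
def pyIntAt (S : List String) (i : Int) : Int :=
  ((PySem.List.pyGet? S i).bind PySem.Int.ofStr?).getD 0

def stepA (S : List String) (p : Int × Int) (i : Int) : Int × Int :=
  let sum := p.1 + pyIntAt S (i - 1)
  if pyIntAt S i > 0 then
    if sum < i then (i, p.2 + i - sum) else (sum, p.2)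
  else (sum, p.2)

def solve (Smax : Int) (S : List String) : Int :=
  if Smax = 0 then 0
  else ((PySem.List.pyRange 1 (Smax + 1) 1).foldl (stepA S) (0, 0)).2

-- ===== PORT B =====
-- int(s); Pre_solve ensures every parsed string succeeds, so the default is never used
def parseB (s : String) : Int := (PySem.Int.ofStr? s).getD 0

-- the 'total += v; prefixes.append(total)' loop of Source B, as structural recursion
def prefixSumsB (total : Int) : List Int → List Int
  | [] => []
  | v :: vs => (total + v) :: prefixSumsB (total + v) vs

def solve_alt (Smax : Int) (S : List String) : Int :=
  if Smax ≤ 0 then 0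
  else
    let vals := (PySem.List.slice S none (some (Smax + 1))).map parseB
    let prefixes := prefixSumsB 0 (PySem.List.slice vals none (some (-1)))
    let deficits := (PySem.List.enumerate prefixes 0).filterMap
      (fun ip => if PySem.List.pyGetD vals (ip.1 + 1) 0 > 0 then some (ip.1 + 1 - ip.2) else none)
    (PySem.List.max? (0 :: deficits) (fun y => y)).getD 0

-- ===== PRECONDITION & SPEC =====
-- Pre_solve excludes exactly the inputs where Python's A raises: for Smax > 0 it reads
-- S[0..Smax] and calls int() on each, so the list must have more than Smax entries and
-- those entries must be int-parseable; for Smax ≤ 0 the loop body never runs.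
def Pre_solve (Smax : Int) (S : List String) : Prop :=
  Smax ≤ 0 ∨ (Smax < S.length ∧ ∀ s ∈ S.take (Smax.toNat + 1), (PySem.Int.ofStr? s).isSome = true)
instance (Smax : Int) (S : List String) : Decidable (Pre_solve Smax S) := by
  unfold Pre_solve; infer_instance

def pvWitness_solve : Int × List String := (1, ["1", "2"])

def Spec_solve (Smax : Int) (S : List String) (out : Int) : Prop := out = solve_alt Smax S
instance (Smax : Int) (S : List String) (out : Int) : Decidable (Spec_solve Smax S out) := by
  unfold Spec_solve; infer_instance

-- ===== CLAIM (what is proved, stated in full; the proofs are below) =====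
def Claim_equal_solve : Prop := ∀ (Smax : Int) (S : List String), Dom_solve Smax S → Pre_solve Smax S → Spec_solve Smax S (solve Smax S)

-- ===== LEMMAS AND PROOFS =====

-- proof-side: B's loop body over the parsed value list (pure), and B's final value
def stepBv (vs : List Int) (p : Int × Int) (i : Int) : Int × Int :=
  let pfx := p.1 + PySem.List.pyGetD vs (i - 1) 0
  (pfx, if PySem.List.pyGetD vs i 0 > 0 then max p.2 (i - pfx) else p.2)

def bvalB (vs : List Int) : Int :=
  ((PySem.List.enumerate (prefixSumsB 0 vs.dropLast) 0).filterMap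
    (fun ip => if PySem.List.pyGetD vs (ip.1 + 1) 0 > 0 then some (ip.1 + 1 - ip.2) else none)).foldl max 0

lemma pyGetD_app (ws : List Int) (x : Int) (k : Int) (h0 : 0 ≤ k) (h1 : k < (ws.length : Int)) :
    PySem.List.pyGetD (ws ++ [x]) k 0 = PySem.List.pyGetD ws k 0 := by
  have hk : k.toNat < ws.length := by omega
  have hA : k < (((ws ++ [x]).length : Nat) : Int) := by simp; omega
  rw [PySem.List.pyGetD_eq_getElem (ws ++ [x]) 0 h0 hA,
      PySem.List.pyGetD_eq_getElem ws 0 h0 h1,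
      List.getElem_append_left hk]

lemma length_prefixSumsB (t : Int) (l : List Int) : (prefixSumsB t l).length = l.length := by
  induction l generalizing t with
  | nil => rfl
  | cons v vs ih => simp [prefixSumsB, ih]

lemma prefixSumsB_append (t : Int) (ws : List Int) (x : Int) :
    prefixSumsB t (ws ++ [x]) = prefixSumsB t ws ++ [t + ws.sum + x] := by
  induction ws generalizing t with
  | nil => simp [prefixSumsB]
  | cons v vs ih => simp [prefixSumsB, ih]; ring_nf

-- one step: A's corrected state (b + m, m) tracks B's raw state (b, m)
lemma step_rel (S : List String) (vs : List Int) (b m i : Int)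
    (h1 : pyIntAt S (i - 1) = PySem.List.pyGetD vs (i - 1) 0)
    (h2 : pyIntAt S i = PySem.List.pyGetD vs i 0) :
    stepA S (b + m, m) i = ((stepBv vs (b, m) i).1 + (stepBv vs (b, m) i).2, (stepBv vs (b, m) i).2) := by
  simp only [stepA, stepBv, h1, h2]
  set d := PySem.List.pyGetD vs (i - 1) 0 with hd
  by_cases hc : PySem.List.pyGetD vs i 0 > 0
  · by_cases hlt : b + m + d < i
    · rw [max_eq_right (by omega : m ≤ i - (b + d))]
      simp [hc, hlt, Prod.ext_iff]; omega
    · rw [max_eq_left (by omega : i - (b + d) ≤ m)]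
      simp [hc, hlt, Prod.ext_iff]; omega
  · simp [hc, Prod.ext_iff]; omega

lemma fold_rel (S : List String) (vs : List Int) (L : List Int)
    (h : ∀ i ∈ L, pyIntAt S (i - 1) = PySem.List.pyGetD vs (i - 1) 0 ∧
                  pyIntAt S i = PySem.List.pyGetD vs i 0) :
    ∀ b m : Int, (L.foldl (stepA S) (b + m, m)).2 = (L.foldl (stepBv vs) (b, m)).2 := by
  induction L with
  | nil => intro b m; rfl
  | cons i L ih =>
      intro b m
      have hi := h i (by simp)
      simp only [List.foldl_cons, step_rel S vs b m i hi.1 hi.2]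
      exact ih (fun j hj => h j (by simp [hj])) (stepBv vs (b, m) i).1 (stepBv vs (b, m) i).2

-- the pure core: B's loop over indices 1..len(vs)-1 computes the raw prefix sum and bvalB
lemma foldB_eq (vs : List Int) :
    (PySem.List.pyRange 1 (vs.length : Int) 1).foldl (stepBv vs) (0, 0) =
      (vs.dropLast.sum, bvalB vs) := by
  induction vs using List.reverseRecOn with
  | nil => simp [PySem.List.pyRange_one_eq_nil, bvalB, prefixSumsB]
  | append_singleton ws x ih =>
      rcases eq_or_ne ws [] with rfl | hws
      · simp [PySem.List.pyRange_one_eq_nil, bvalB, prefixSumsB]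
      · have hlen : 0 < ws.length := List.length_pos_iff.mpr hws
        have hcast : ((ws ++ [x]).length : Int) = (ws.length : Int) + 1 := by simp
        rw [hcast, PySem.List.pyRange_one_succ_right (by exact_mod_cast hlen),
            List.foldl_append]
        have hpre : (PySem.List.pyRange 1 (ws.length : Int) 1).foldl (stepBv (ws ++ [x])) (0, 0)
            = (ws.dropLast.sum, bvalB ws) := by
          rw [← ih]
          refine PySem.List.foldl_congr_mem _ _ _ _ (fun acc i hiL => ?_)
          have hi := (PySem.List.mem_pyRange_one).mp hiL
          simp only [stepBv, pyGetD_app ws x (i - 1) (by omega) (by omega),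
                     pyGetD_app ws x i (by omega) (by omega)]
        rw [hpre]
        -- last step, i = ws.length
        have hlast : PySem.List.pyGetD (ws ++ [x]) (ws.length : Int) 0 = x := by
          simp [PySem.List.pyGetD_natCast]
        have hgl : PySem.List.pyGetD (ws ++ [x]) ((ws.length : Int) - 1) 0
            = ws.getLast hws := by
          have h1 : ((ws.length : Int) - 1) = ((ws.length - 1 : Nat) : Int) := by omega
          rw [h1, PySem.List.pyGetD_natCast, List.getLast_eq_getElem,
              List.getD_eq_getElem (ws ++ [x]) 0 (by simp)]
          exact List.getElem_append_left (by omega)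
        have hsum : ws.dropLast.sum + ws.getLast hws = ws.sum := by
          conv_rhs => rw [← List.dropLast_append_getLast hws]
          simp
        -- unfold the single fold step
        show stepBv (ws ++ [x]) (ws.dropLast.sum, bvalB ws) (ws.length : Int) = _
        simp only [stepBv, hgl, hlast, hsum]
        -- now compute the RHS bvalB (ws ++ [x])
        have hdrop : (ws ++ [x]).dropLast = ws := by simp
        have hpfx : prefixSumsB 0 ws = prefixSumsB 0 ws.dropLast ++ [ws.sum] := by
          conv_lhs => rw [← List.dropLast_append_getLast hws]
          rw [prefixSumsB_append]
          rw [show (0 : Int) + ws.dropLast.sum + ws.getLast hws = ws.sum by omega]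
        have hplen : (prefixSumsB 0 ws.dropLast).length = ws.length - 1 := by
          rw [length_prefixSumsB]; simp
        have henum : PySem.List.enumerate (prefixSumsB 0 ws.dropLast ++ [ws.sum]) 0
            = PySem.List.enumerate (prefixSumsB 0 ws.dropLast) 0
              ++ [(((ws.length - 1 : Nat) : Int), ws.sum)] := by
          rw [PySem.List.enumerate_append, hplen]
          simp [PySem.List.enumerate_cons, PySem.List.enumerate_nil]
        have hcongr : ∀ ip ∈ PySem.List.enumerate (prefixSumsB 0 ws.dropLast) 0,
            (if PySem.List.pyGetD (ws ++ [x]) (ip.1 + 1) 0 > 0 then some (ip.1 + 1 - ip.2) else none)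
            = (if PySem.List.pyGetD ws (ip.1 + 1) 0 > 0 then some (ip.1 + 1 - ip.2) else none) := by
          intro ip hip
          obtain ⟨k, hk, rfl⟩ := (PySem.List.mem_enumerate_iff _ _ _).mp hip
          rw [hplen] at hk
          rw [pyGetD_app ws x _ (by omega) (by push_cast; omega)]
        have hid : ((ws.length - 1 : Nat) : Int) + 1 = (ws.length : Int) := by omega
        unfold bvalB
        rw [hdrop, hpfx, henum, List.filterMap_append, List.filterMap_congr hcongr]
        simp only [List.filterMap_cons, List.filterMap_nil, hid, hlast]
        by_cases hx : x > 0
        · simp only [if_pos hx, List.foldl_append, List.foldl_cons, List.foldl_nil]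
        · simp only [if_neg hx, List.append_nil]

-- indexing the parsed slice agrees with A's repeated int(S[k]) for 0 ≤ k ≤ Smax
lemma pyIntAt_eq (S : List String) (Smax k : Int) (hS : Smax < (S.length : Int))
    (h0 : 0 ≤ k) (h1 : k ≤ Smax) :
    pyIntAt S k = PySem.List.pyGetD ((PySem.List.slice S none (some (Smax + 1))).map parseB) k 0 := by
  have hsl : PySem.List.slice S none (some (Smax + 1)) = S.take (Smax + 1).toNat :=
    PySem.List.slice_to S (by omega)
  have hkS : k.toNat < S.length := by omega
  have hkT : k.toNat < ((S.take (Smax + 1).toNat).map parseB).length := by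
    simp; omega
  have hkT : k < (((S.take (Smax + 1).toNat).map parseB).length : Nat) := by
    simp; omega
  have hkS' : k < ((S.length : Nat) : Int) := by omega
  rw [hsl, PySem.List.pyGetD_eq_getElem _ 0 h0 hkT]
  unfold pyIntAt
  rw [PySem.List.pyGet?_eq_some_getElem S h0 hkS']
  simp [parseB, List.getElem_take]

-- ===== VERDICT (by name: the statement is the Claim_ definition above) =====
theorem solve_spec : Claim_equal_solve := by
  intro Smax S _ hpre
  unfold Spec_solve solve solve_alt
  by_cases hle : Smax ≤ 0
  · rcases eq_or_lt_of_le hle with rfl | hlt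
    · simp
    · rw [if_neg (by omega), if_pos hle,
          PySem.List.pyRange_one_eq_nil (by omega)]
      rfl
  · have hS : Smax < (S.length : Int) := by
      rcases hpre with h | h
      · omega
      · exact h.1
    rw [if_neg (by omega), if_neg hle]
    set vals := (PySem.List.slice S none (some (Smax + 1))).map parseB with hvals
    have hvlen : (vals.length : Int) = Smax + 1 := by
      rw [hvals, PySem.List.slice_to S (by omega)]
      simp; omega
    have hfold : ((PySem.List.pyRange 1 (Smax + 1) 1).foldl (stepA S) (0, 0)).2
        = ((PySem.List.pyRange 1 (Smax + 1) 1).foldl (stepBv vals) (0, 0)).2 := by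
      have h00 : ((0 : Int), (0 : Int)) = ((0 : Int) + 0, (0 : Int)) := by norm_num
      rw [h00]
      refine fold_rel S vals _ (fun i hiL => ?_) 0 0
      have hi := (PySem.List.mem_pyRange_one).mp hiL
      exact ⟨pyIntAt_eq S Smax (i - 1) hS (by omega) (by omega),
             pyIntAt_eq S Smax i hS (by omega) (by omega)⟩
    rw [hfold, ← hvlen, foldB_eq vals]
    simp only [PySem.List.slice_to_neg_one, PySem.List.max?_id_cons]
    unfold bvalB
    norm_num
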